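-- pv_equiv track=rewrite | github.com/jt-lanl/fever-probes | probe.py | stemfound
-- ===== SOURCE A (Python) =====
-- RC_Table = str.maketrans("ATCG","TAGC")
--
-- def reverse_complement(s):
--     ''' return the reverse complement of string s:
--     A <-> T, C <-> G, and order is revered '''
--     ## Uses RC_Table which is defined globally, above
--     return s.translate(RC_Table)[::-1]
--
-- def stemfound(s,length):
--     ''' if a stem-loop found of given length, return the stem; else return blank '''
--     n = len(s)
--     candidate = ''
--     for j in range(n-2*length+1):
--         t = s[j:j+length]
--         if reverse_complement(t) in s[j+length:]:
--             candidate = t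
--             break
--
--     return candidate
-- ===== SOURCE B (Python) =====
-- def stemfound(s, length):
--     ''' if a stem-loop found of given length, return the stem; else return blank '''
--     if length <= 0:
--         return ''
--     n = len(s)
--     if n < 2 * length:
--         return ''
--     comp = s.translate(str.maketrans("ATCG", "TAGC"))
--     # index: last (greatest) start position of every window that can sit after some stem
--     last = {}
--     for k in range(length, n - length + 1):
--         last[s[k:k+length]] = k
--     for j in range(n - 2*length + 1):
--         rc = comp[j:j+length][::-1]
--         if last.get(rc, -1) >= j + length:
--             return s[j:j+length]
--     return ''
-- ===== Notes on version B (the rewrite author's own statement) =====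
-- stated objective: alternative
-- what changed: Instead of rescanning the remaining suffix for each window's reverse complement (a substring search per window), B translates the string once, builds a dictionary mapping each reachable window to its last start position, and answers each window by one lookup compared against j+length.
-- outside the precondition, e.g. on stemfound('AT', -1): A returns 'A', B returns ''; on stemfound('ABCDEF', -1): A returns '', B returns ''
import Mathlib
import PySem

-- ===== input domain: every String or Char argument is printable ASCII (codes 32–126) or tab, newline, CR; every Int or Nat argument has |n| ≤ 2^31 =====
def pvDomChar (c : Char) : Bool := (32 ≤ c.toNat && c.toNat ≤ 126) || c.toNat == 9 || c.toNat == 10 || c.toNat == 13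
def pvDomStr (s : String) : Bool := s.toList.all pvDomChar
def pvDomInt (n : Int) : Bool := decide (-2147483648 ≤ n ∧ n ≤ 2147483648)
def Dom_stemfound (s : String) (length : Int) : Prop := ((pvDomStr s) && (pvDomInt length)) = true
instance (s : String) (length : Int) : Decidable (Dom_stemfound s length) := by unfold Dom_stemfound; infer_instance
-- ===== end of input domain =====

-- B replaces A's per-window reverse-complement + suffix substring rescan by one translate pass
-- and a dictionary mapping each reachable window to its last start position (objective: alternative).

-- ===== PORT A =====
-- str.maketrans("ATCG","TAGC") + s.translate: A<->T, C<->G, every other char unchanged (exact)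
def pvTrans (c : Char) : Char :=
  if c = 'A' then 'T' else if c = 'T' then 'A' else if c = 'C' then 'G' else if c = 'G' then 'C' else c

-- s.translate(RC_Table)[::-1]  ([::-1] is reverse: PySem.List.slice?_none_none_neg_one)
def pvReverseComplement (l : List Char) : List Char := (l.map pvTrans).reverse

-- the for-j loop with its break, run lazily: fuel = the trip count of range(n-2*length+1)
def pvLoopA (cs : List Char) (length : Int) (j : Int) : Nat → Option (List Char)
  | 0 => none
  | Nat.succ m =>
    let t := PySem.List.slice cs (some j) (some (j + length))
    if PySem.Chars.isIn (pvReverseComplement t) (PySem.List.slice cs (some (j + length)) none)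
    then some t   -- candidate = t; break
    else pvLoopA cs length (j + 1) m

def stemfound (s : String) (length : Int) : String :=
  let cs := s.toList
  let n : Int := PySem.Str.len s
  let r := pvLoopA cs length 0 (n - 2*length + 1).toNat
  String.ofList (r.getD [])

-- ===== PORT B =====
-- B's str.maketrans("ATCG","TAGC") table, applied char by char by s.translate (exact)
def pvTransB (c : Char) : Char :=
  if c = 'A' then 'T' else if c = 'T' then 'A' else if c = 'C' then 'G' else if c = 'G' then 'C' else c

def stemfound_alt (s : String) (length : Int) : String :=
  if length ≤ 0 then "" else
  let cs := s.toList
  let n : Int := PySem.Str.len s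
  if n < 2 * length then "" else
  -- comp = s.translate(...)
  let comp := cs.map pvTransB
  -- last[s[k:k+length]] = k for k in range(length, n - length + 1)
  let last := (PySem.List.pyRange length (n - length + 1) 1).foldl
      (fun (d : PySem.Dict (List Char) Int) k =>
        d.insert (PySem.List.slice cs (some k) (some (k + length))) k)
      PySem.Dict.empty
  -- for j in range(n-2*length+1): … return s[j:j+length] — none = no return yet
  let r := (PySem.List.pyRange 0 (n - 2*length + 1) 1).foldl
      (fun (res : Option (List Char)) j =>
        match res with
        | some _ => res
        | none =>
          let rc := (PySem.List.slice comp (some j) (some (j + length))).reverse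
          if j + length ≤ last.getD rc (-1)
          then some (PySem.List.slice cs (some j) (some (j + length))) else none)
      none
  String.ofList (r.getD [])

-- ===== PRECONDITION & SPEC =====
-- Pre_ excludes negative length, outside the task's natural domain (a stem length is a count ≥ 0):
-- there A still returns values, but they are accidents of Python's negative-slice arithmetic.
def Pre_stemfound (s : String) (length : Int) : Prop := 0 ≤ length
instance (s : String) (length : Int) : Decidable (Pre_stemfound s length) := by unfold Pre_stemfound; infer_instance

def pvWitness_stemfound : String × Int := ("ACCGGT", 3)

def Spec_stemfound (s : String) (length : Int) (out : String) : Prop := out = stemfound_alt s length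
instance (s : String) (length : Int) (out : String) : Decidable (Spec_stemfound s length out) := by unfold Spec_stemfound; infer_instance

-- ===== CLAIM =====
def Claim_equal_stemfound : Prop := ∀ (s : String) (length : Int), Dom_stemfound s length → Pre_stemfound s length → Spec_stemfound s length (stemfound s length)

-- ===== LEMMAS AND PROOFS =====

-- an early-exit loop's state stays put once it is set
theorem foldl_option_frozen {α β : Type} (f : Option β → α → Option β)
    (h : ∀ b x, f (some b) x = some b) (l : List α) (b : β) :
    l.foldl f (some b) = some b := by
  induction l with
  | nil => rfl
  | cons x xs ih => simp [List.foldl, h, ih]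

-- the lazy loop is the fold of its step function over the range it walks
theorem pvLoopA_eq_foldl (cs : List Char) (length : Int) (m : Nat) (j : Int) :
    pvLoopA cs length j m =
      (PySem.List.pyRange j (j + m) 1).foldl
        (fun (candidate : Option (List Char)) j =>
          match candidate with
          | some _ => candidate
          | none =>
            let t := PySem.List.slice cs (some j) (some (j + length))
            if PySem.Chars.isIn (pvReverseComplement t) (PySem.List.slice cs (some (j + length)) none)
            then some t else none)
        none := by
  induction m generalizing j with
  | zero =>
    rw [show j + ((0:Nat) : Int) = j by simp,
      PySem.List.pyRange_one_eq_nil le_rfl]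
    rfl
  | succ m ih =>
    rw [show j + ((m+1 : Nat) : Int) = (j + 1) + (m : Int) by push_cast; ring]
    rw [PySem.List.pyRange_one_cons (by omega : j < (j + 1) + (m : Int))]
    rw [List.foldl_cons]
    show pvLoopA cs length j (m+1) = _
    rw [pvLoopA]
    simp only
    split_ifs with hc
    · rw [foldl_option_frozen _ (fun b x => rfl)]
    · exact ih (j + 1)

-- the dictionary B builds: window of width `length` at k ∈ [lo, lo+m) ↦ last start position
def pvLast (cs : List Char) (length : Int) (lo : Int) (m : Nat) : PySem.Dict (List Char) Int :=
  (PySem.List.pyRange lo (lo + m) 1).foldl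
    (fun d k => d.insert (PySem.List.slice cs (some k) (some (k + length))) k)
    PySem.Dict.empty

theorem pvLast_succ (cs : List Char) (length : Int) (lo : Int) (m : Nat) :
    pvLast cs length lo (m+1) =
      (pvLast cs length lo m).insert
        (PySem.List.slice cs (some (lo + m)) (some ((lo + m) + length))) (lo + m) := by
  unfold pvLast
  rw [show lo + ((m+1 : Nat) : Int) = (lo + m) + 1 by push_cast; ring]
  rw [PySem.List.pyRange_one_succ_right (by omega : lo ≤ lo + (m : Int))]
  simp [List.foldl_append]

theorem pvLast_sound (cs : List Char) (length : Int) (lo : Int) (m : Nat)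
    (p : List Char) (h : (pvLast cs length lo m).getD p (-1) ≠ -1) :
    lo ≤ (pvLast cs length lo m).getD p (-1) ∧ (pvLast cs length lo m).getD p (-1) < lo + m ∧
      PySem.List.slice cs (some ((pvLast cs length lo m).getD p (-1)))
        (some ((pvLast cs length lo m).getD p (-1) + length)) = p := by
  induction m with
  | zero =>
    exfalso; apply h
    simp [pvLast, PySem.Dict.getD_empty]
  | succ m ih =>
    by_cases hp : p = PySem.List.slice cs (some (lo + m)) (some ((lo + m) + length))
    · rw [pvLast_succ]
      simp only [PySem.Dict.getD_insert, if_pos hp]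
      exact ⟨by omega, by push_cast; omega, hp.symm⟩
    · rw [pvLast_succ] at h ⊢
      simp only [PySem.Dict.getD_insert, if_neg hp] at h ⊢
      obtain ⟨h1, h2, h3⟩ := ih h
      exact ⟨h1, by push_cast; omega, h3⟩

theorem pvLast_complete (cs : List Char) (length : Int) (lo : Int) (m : Nat) (p : List Char)
    (k : Int) (hk0 : lo ≤ k) (hkm : k < lo + m)
    (hw : PySem.List.slice cs (some k) (some (k + length)) = p) :
    k ≤ (pvLast cs length lo m).getD p (-1) := by
  induction m with
  | zero => exact absurd hkm (by push_cast; omega)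
  | succ m ih =>
    rw [pvLast_succ, PySem.Dict.getD_insert]
    split_ifs with hp
    · push_cast at hkm ⊢; omega
    · have hkm' : k < lo + m := by
        by_contra hge
        have : k = lo + (m : Int) := by push_cast at hkm; omega
        subst this
        exact hp (hw ▸ rfl)
      exact ih hkm'

-- the key point: "rc(t) in s[j+length:]" ⟺ "last.get(rc(t), -1) >= j+length"
theorem pv_key_iff (cs : List Char) (length : Int) (hl : 1 ≤ length) (j : Int)
    (hj : 0 ≤ j) (h2l : j + 2*length ≤ (cs.length : Int)) (p : List Char)
    (hp : (p.length : Int) = length) :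
    PySem.Chars.isIn p (PySem.List.slice cs (some (j + length)) none) = true ↔
      j + length ≤
        (pvLast cs length length ((cs.length : Int) - 2*length + 1).toNat).getD p (-1) := by
  have hm0 : 0 ≤ j + length := by omega
  rw [PySem.List.slice_from cs hm0]
  rw [← PySem.Chars.exists_prefix_drop_iff_isIn]
  set M := ((cs.length : Int) - 2*length + 1).toNat with hM
  have hMv : (M : Int) = (cs.length : Int) - 2*length + 1 := by
    rw [hM, Int.toNat_of_nonneg (by omega)]
  constructor
  · rintro ⟨i, hpre⟩
    rw [List.drop_drop] at hpre
    set K : Nat := (j + length).toNat + i with hK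
    have hlen : p.length ≤ cs.length - K := by
      have := hpre.length_le
      simpa using this
    have hKle : K + p.length ≤ cs.length := by
      have hpos : 1 ≤ p.length := by omega
      omega
    have hwin : PySem.List.slice cs (some (K : Int)) (some ((K : Int) + length)) = p := by
      rw [show ((K : Int) + length) = (K : Int) + (p.length : Int) by omega]
      rw [PySem.List.slice_natCast_add]
      exact (List.prefix_iff_eq_take.mp hpre).symm
    have hKlo : length ≤ (K : Int) := by omega
    have hKM : (K : Int) < length + (M : Int) := by omega
    have := pvLast_complete cs length length M p (K : Int) hKlo hKM hwin
    omega
  · intro hge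
    have hne : (pvLast cs length length M).getD p (-1) ≠ -1 := by omega
    obtain ⟨h0, hlt, hwin⟩ := pvLast_sound cs length length M p hne
    set v : Int := (pvLast cs length length M).getD p (-1) with hv
    have hvn : v < (cs.length : Int) - length + 1 := by omega
    refine ⟨v.toNat - (j + length).toNat, ?_⟩
    rw [List.drop_drop]
    rw [show (j + length).toNat + (v.toNat - (j + length).toNat) = v.toNat by omega]
    rw [PySem.List.slice_toNat cs (by omega) (by omega)] at hwin
    rw [show (v + length).toNat - v.toNat = p.length by omega] at hwin
    exact List.prefix_iff_eq_take.mpr hwin.symm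

-- slicing commutes with the one-pass translation
theorem slice_map_trans (cs : List Char) (a b : Int) (ha : 0 ≤ a) (hb : 0 ≤ b) :
    PySem.List.slice (cs.map pvTransB) (some a) (some b) =
      (PySem.List.slice cs (some a) (some b)).map pvTransB := by
  rw [PySem.List.slice_toNat _ ha hb, PySem.List.slice_toNat _ ha hb]
  rw [List.map_take, List.map_drop]

theorem pv_core (cs : List Char) (length : Int) (hl : 1 ≤ length)
    (h2l : 2*length ≤ (cs.length : Int)) :
    (PySem.List.pyRange 0 ((cs.length : Int) - 2*length + 1)).foldl
      (fun (candidate : Option (List Char)) j =>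
        match candidate with
        | some _ => candidate
        | none =>
          let t := PySem.List.slice cs (some j) (some (j + length))
          if PySem.Chars.isIn (pvReverseComplement t) (PySem.List.slice cs (some (j + length)) none)
          then some t else none)
      none
  = (PySem.List.pyRange 0 ((cs.length : Int) - 2*length + 1)).foldl
      (fun (res : Option (List Char)) j =>
        match res with
        | some _ => res
        | none =>
          let rc := (PySem.List.slice (cs.map pvTransB) (some j) (some (j + length))).reverse
          if j + length ≤ ((PySem.List.pyRange length ((cs.length : Int) - length + 1)).foldl
              (fun (d : PySem.Dict (List Char) Int) k =>
                d.insert (PySem.List.slice cs (some k) (some (k + length))) k)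
              PySem.Dict.empty).getD rc (-1)
          then some (PySem.List.slice cs (some j) (some (j + length))) else none)
      none := by
  simp only [show (cs.length : Int) - length + 1
      = length + ((((cs.length : Int) - 2*length + 1).toNat : Int)) from by
    rw [Int.toNat_of_nonneg (by omega)]; ring]
  apply PySem.List.foldl_congr_mem
  intro acc j hj
  rw [PySem.List.mem_pyRange_one] at hj
  match acc with
  | some b => rfl
  | none =>
    simp only
    have ht : ((PySem.List.slice cs (some j) (some (j + length))).length : Int) = length := by
      rw [PySem.List.slice_toNat cs hj.1 (by omega)]
      simp only [List.length_take, List.length_drop]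
      omega
    have hrc : (PySem.List.slice (cs.map pvTransB) (some j) (some (j + length))).reverse
        = pvReverseComplement (PySem.List.slice cs (some j) (some (j + length))) := by
      rw [slice_map_trans cs j (j + length) hj.1 (by omega)]
      rfl
    have hp : (((PySem.List.slice (cs.map pvTransB) (some j) (some (j + length))).reverse).length
        : Int) = length := by
      rw [hrc, pvReverseComplement]; simpa using ht
    rw [hrc]
    exact if_congr (pv_key_iff cs length hl j hj.1 (by omega) _
      (by rw [← hrc]; exact hp)) rfl rfl

theorem stemfound_spec' (s : String) (length : Int) (hpre : 0 ≤ length) :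
    stemfound s length = stemfound_alt s length := by
  unfold stemfound stemfound_alt
  simp only [PySem.Str.len_eq]
  by_cases h0 : length ≤ 0
  · rw [if_pos h0]
    have hl0 : length = 0 := le_antisymm h0 hpre
    subst hl0
    rw [show ((s.toList.length : Int) - 2*0 + 1).toNat = s.toList.length + 1 by omega]
    rw [pvLoopA]
    have ht : PySem.List.slice s.toList (some 0) (some (0 + 0)) = [] := by
      rw [show ((0:Int) + 0) = 0 by ring, PySem.List.slice_toNat s.toList le_rfl le_rfl]
      simp
    simp only [ht]
    rw [show pvReverseComplement [] = [] from rfl, if_pos (PySem.Chars.isIn_nil _)]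
    rfl
  · rw [if_neg h0]
    by_cases h2 : (s.toList.length : Int) < 2 * length
    · rw [if_pos h2]
      rw [show ((s.toList.length : Int) - 2*length + 1).toNat = 0 by omega]
      rfl
    · rw [if_neg h2]
      rw [pvLoopA_eq_foldl]
      rw [show (0 : Int) + (((s.toList.length : Int) - 2*length + 1).toNat : Int)
          = (s.toList.length : Int) - 2*length + 1 by
        rw [Int.toNat_of_nonneg (by omega)]; ring]
      exact congrArg (fun r : Option (List Char) => String.ofList (r.getD []))
        (pv_core s.toList length (by omega) (by omega))

-- ===== VERDICT =====
theorem stemfound_spec : Claim_equal_stemfound := by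
  intro s length _ hpre
  exact stemfound_spec' s length hpre
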